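-- pv_equiv track=rewrite | github.com/VicenteRamirez15/NonogramaPP | mecanicas.py | get_secuencias
-- ===== SOURCE A (Python) =====
-- def get_secuencias(linea):
--     secuencias = []
--     count = 0
--     valor_anterior = 0
--     for valor in linea:
--         if valor != 0 and (valor == valor_anterior or valor_anterior==0):
--             count += 1
--         elif count != 0:
--             secuencias.append((valor_anterior,count))
--             count = 0
--             if valor != 0:
--                 count+=1
--         valor_anterior=valor
--
--     if count != 0:
--         secuencias.append((valor_anterior,count))
--     return secuencias
-- ===== SOURCE B (Python) =====
-- def get_secuencias(linea):
--     # Two-pointer run extraction: find each maximal run of equal values,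
--     # emit (value, run length) for nonzero values.
--     secuencias = []
--     i = 0
--     n = len(linea)
--     while i < n:
--         v = linea[i]
--         j = i + 1
--         while j < n and linea[j] == v:
--             j += 1
--         if v != 0:
--             secuencias.append((v, j - i))
--         i = j
--     return secuencias
-- ===== Notes on version B (the rewrite author's own statement) =====
-- stated objective: alternative
-- what changed: Replaces A's per-element state machine (running count, previous value, deferred final flush) with a two-pointer maximal-run scan that emits each nonzero run directly.
import Mathlib
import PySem

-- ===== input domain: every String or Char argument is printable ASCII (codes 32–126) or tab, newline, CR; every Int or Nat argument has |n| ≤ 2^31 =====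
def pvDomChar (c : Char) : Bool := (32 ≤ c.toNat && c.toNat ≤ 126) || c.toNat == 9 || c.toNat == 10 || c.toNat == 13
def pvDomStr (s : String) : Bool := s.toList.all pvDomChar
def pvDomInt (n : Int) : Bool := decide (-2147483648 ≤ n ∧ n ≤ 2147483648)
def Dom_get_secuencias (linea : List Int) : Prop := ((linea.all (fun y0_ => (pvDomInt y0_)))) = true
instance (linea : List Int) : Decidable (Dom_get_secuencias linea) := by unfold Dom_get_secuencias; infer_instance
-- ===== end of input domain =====

-- B replaces A's running-count state machine with a two-pointer maximal-run scan; alternative decomposition, same cost.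

-- ===== PORT A =====
-- one iteration of A's for-loop; state = (secuencias, count, valor_anterior)
def pvStepA (s : List (Int × Int) × Int × Int) (valor : Int) : List (Int × Int) × Int × Int :=
  let (secuencias, count, valor_anterior) := s
  if valor ≠ 0 ∧ (valor = valor_anterior ∨ valor_anterior = 0) then
    (secuencias, count + 1, valor)
  else if count ≠ 0 then
    (secuencias ++ [(valor_anterior, count)], if valor ≠ 0 then 1 else 0, valor)
  else
    (secuencias, count, valor)

def get_secuencias (linea : List Int) : List (Int × Int) :=
  let s := linea.foldl pvStepA ([], 0, 0)
  if s.2.1 ≠ 0 then s.1 ++ [(s.2.2, s.2.1)] else s.1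

-- ===== PORT B =====
-- Source B's outer while advances i past one maximal run per step (inner while = takeWhile);
-- the run has length (run-of-tail) + 1 and is emitted iff its value is nonzero.
def get_secuencias_alt (linea : List Int) : List (Int × Int) :=
  match linea with
  | [] => []
  | v :: rest =>
    let run := rest.takeWhile (· == v)
    let restl := rest.dropWhile (· == v)
    (if v ≠ 0 then [(v, (run.length : Int) + 1)] else []) ++ get_secuencias_alt restl
termination_by linea.length
decreasing_by
  simp only [List.length_cons]
  exact Nat.lt_succ_of_le (List.length_dropWhile_le _ _)

-- ===== PRECONDITION & SPEC =====
def Spec_get_secuencias (linea : List Int) (out : List (Int × Int)) : Prop := out = get_secuencias_alt linea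
instance (linea : List Int) (out : List (Int × Int)) : Decidable (Spec_get_secuencias linea out) := by unfold Spec_get_secuencias; infer_instance

-- ===== CLAIM (what is proved, stated in full; the proofs are below) =====
def Claim_equal_get_secuencias : Prop := ∀ (linea : List Int), Dom_get_secuencias linea → Spec_get_secuencias linea (get_secuencias linea)

-- ===== LEMMAS AND PROOFS =====

-- finalize A's state (the trailing "if count != 0: append")
def pvFin (s : List (Int × Int) × Int × Int) : List (Int × Int) :=
  if s.2.1 ≠ 0 then s.1 ++ [(s.2.2, s.2.1)] else s.1

-- B skips leading zeros one at a time
lemma alt_dropZeros (linea : List Int) :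
    get_secuencias_alt (linea.dropWhile (· == (0:Int))) = get_secuencias_alt linea := by
  induction linea with
  | nil => rfl
  | cons x xs ih =>
    by_cases hx : x = 0
    · subst hx
      have h1 : List.dropWhile (fun y => y == (0:Int)) ((0:Int) :: xs)
          = List.dropWhile (fun y => y == (0:Int)) xs := by
        simp
      rw [show (((0:Int) :: xs).dropWhile (· == (0:Int))) = xs.dropWhile (· == (0:Int)) from h1, ih]
      conv_rhs => rw [get_secuencias_alt]
      simp [ih]
    · simp [hx]

-- the joint loop invariant: from an idle state (count = 0, prev = 0) A produces sec ++ B(linea);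
-- from a mid-run state (count = c ≥ 1 on value v ≠ 0) A extends the run by the leading v's of linea.
lemma mainInv (n : Nat) : ∀ (linea : List Int), linea.length ≤ n →
    (∀ sec, pvFin (linea.foldl pvStepA (sec, 0, 0)) = sec ++ get_secuencias_alt linea) ∧
    (∀ sec (c v : Int), v ≠ 0 → 1 ≤ c →
      pvFin (linea.foldl pvStepA (sec, c, v)) =
        sec ++ (v, c + ((linea.takeWhile (· == v)).length : Int)) ::
          get_secuencias_alt (linea.dropWhile (· == v))) := by
  induction n with
  | zero =>
    intro linea hlen
    have : linea = [] := List.eq_nil_of_length_eq_zero (Nat.le_zero.mp hlen)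
    subst this
    constructor
    · intro sec; simp [pvFin, get_secuencias_alt]
    · intro sec c v hv hc
      simp [pvFin, List.foldl, get_secuencias_alt, (show c ≠ 0 by omega)]
  | succ n ih =>
    intro linea hlen
    match linea with
    | [] =>
      constructor
      · intro sec; simp [pvFin, get_secuencias_alt]
      · intro sec c v hv hc
        simp [pvFin, List.foldl, get_secuencias_alt, (show c ≠ 0 by omega)]
    | x :: xs =>
      have hxs : xs.length ≤ n := by simpa using Nat.lt_succ_iff.mp (Nat.lt_of_lt_of_le (by simp) hlen)
      constructor
      · -- idle state
        intro sec
        by_cases hx : x = 0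
        · subst hx
          rw [List.foldl_cons, show pvStepA (sec, 0, 0) 0 = (sec, 0, 0) by simp [pvStepA]]
          rw [(ih xs hxs).1 sec]
          conv_rhs => rw [get_secuencias_alt]
          simp [alt_dropZeros]
        · rw [List.foldl_cons, show pvStepA (sec, 0, 0) x = (sec, 1, x) by simp [pvStepA, hx]]
          rw [(ih xs hxs).2 sec 1 x hx (le_refl 1)]
          conv_rhs => rw [get_secuencias_alt]
          simp [hx, add_comm]
      · -- mid-run state
        intro sec c v hv hc
        by_cases hxv : x = v
        · subst hxv
          rw [List.foldl_cons, show pvStepA (sec, c, x) x = (sec, c + 1, x) by simp [pvStepA, hv]]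
          rw [(ih xs hxs).2 sec (c + 1) x hv (by omega)]
          simp
          omega
        · by_cases hx : x = 0
          · subst hx
            rw [List.foldl_cons,
                show pvStepA (sec, c, v) 0 = (sec ++ [(v, c)], 0, 0) by
                  simp [pvStepA, hv, (show c ≠ 0 by omega)]]
            rw [(ih xs hxs).1 (sec ++ [(v, c)])]
            have h0v : ((0:Int) == v) = false := by simp [Ne.symm hv]
            simp only [List.takeWhile_cons, List.dropWhile_cons, h0v, Bool.false_eq_true,
              if_false, List.length_nil]
            rw [show get_secuencias_alt ((0:Int) :: xs)
                  = get_secuencias_alt (xs.dropWhile (· == (0:Int))) by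
                rw [get_secuencias_alt]; simp]
            rw [alt_dropZeros]
            simp
          · rw [List.foldl_cons,
                show pvStepA (sec, c, v) x = (sec ++ [(v, c)], 1, x) by
                  simp [pvStepA, hx, hxv, hv, (show c ≠ 0 by omega)]]
            rw [(ih xs hxs).2 (sec ++ [(v, c)]) 1 x hx (le_refl 1)]
            have hxv' : (x == v) = false := by simp [hxv]
            simp [hxv']
            rw [show get_secuencias_alt (x :: xs)
                  = (x, ((xs.takeWhile (· == x)).length : Int) + 1) ::
                      get_secuencias_alt (xs.dropWhile (· == x)) by
                rw [get_secuencias_alt]; simp [hx]]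
            simp [add_comm]

-- ===== VERDICT (by name: the statement is the Claim_ definition above) =====
theorem get_secuencias_spec : Claim_equal_get_secuencias := by
  intro linea _
  unfold Spec_get_secuencias get_secuencias
  have h := (mainInv linea.length linea le_rfl).1 []
  simpa [pvFin] using h
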